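-- pv_equiv track=rewrite | github.com/ptrebert/project-cross-species | archive/2013-old-code-base/modules/mapping.py | _find_index
-- ===== SOURCE A (Python) =====
-- def _find_index(sequence, modvalue, reverse):
--     if reverse:
--         for item in reversed(sequence):
--             if item % modvalue == 0:
--                 return sequence.index(item)
--     for item in sequence:
--         if item % modvalue == 0:
--             return sequence.index(item)
--     return -1
-- ===== SOURCE B (Python) =====
-- def _find_index(sequence, modvalue, reverse):
--     indices = [i for i, x in enumerate(sequence) if x % modvalue == 0]
--     if not indices:
--         return -1
--     return indices[-1] if reverse else indices[0]
-- ===== Notes on version B (the rewrite author's own statement) =====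
-- stated objective: alternative
-- what changed: replaces A's two sequential scan loops each followed by a .index rescan by one enumerate pass collecting all divisible indices and returning the first or the last one directly
-- intended difference: with reverse=True and duplicates, when the last divisible element's value also occurs earlier in the list, A returns the index of that earlier occurrence (sequence.index confuses value with position) while B returns the actual position of the last divisible element, which is what a reverse search is meant to find — e.g. on _find_index([2, 2], 1, true): A returns 0, B returns 1
import Mathlib
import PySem

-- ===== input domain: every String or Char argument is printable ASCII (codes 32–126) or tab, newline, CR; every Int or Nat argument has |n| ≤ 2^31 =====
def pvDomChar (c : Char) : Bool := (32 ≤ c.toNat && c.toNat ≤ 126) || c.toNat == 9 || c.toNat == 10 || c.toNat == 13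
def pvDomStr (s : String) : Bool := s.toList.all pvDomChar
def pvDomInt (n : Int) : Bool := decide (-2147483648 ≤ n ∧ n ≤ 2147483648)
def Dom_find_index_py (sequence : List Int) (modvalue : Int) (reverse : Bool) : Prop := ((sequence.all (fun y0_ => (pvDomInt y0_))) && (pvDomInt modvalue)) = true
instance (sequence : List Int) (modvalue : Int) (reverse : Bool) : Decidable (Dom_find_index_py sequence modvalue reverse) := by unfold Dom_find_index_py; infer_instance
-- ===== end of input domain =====

-- B collects all divisible indices in one enumerate pass and returns the first or last one
-- directly, instead of A's reversed scan / forward scan each followed by a .index rescan.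

-- ===== PORT A =====
-- A's 'for item in l: if item % m == 0: return orig.index(item)' loop;
-- the '.getD 0' default is unreachable (the returned item is a member of orig).
def pvLoopA (orig : List Int) (m : Int) : List Int → Option Int
  | [] => none
  | x :: rest =>
    if PySem.Int.mod x m == 0 then
      some (((PySem.List.index? orig x).getD 0 : Nat) : Int)
    else pvLoopA orig m rest

def find_index_py (sequence : List Int) (modvalue : Int) (reverse : Bool) : Int :=
  match (if reverse then pvLoopA sequence modvalue sequence.reverse else none) with
  | some i => i
  | none =>
    match pvLoopA sequence modvalue sequence with
    | some i => i
    | none => -1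

-- ===== PORT B =====
def find_index_py_alt (sequence : List Int) (modvalue : Int) (reverse : Bool) : Int :=
  let indices : List Int :=
    ((PySem.List.enumerate sequence 0).filter
      (fun p => PySem.Int.mod p.2 modvalue == 0)).map (·.1)
  match indices with
  | [] => -1
  | i0 :: _ =>
    -- indices[-1] if reverse else indices[0]; the '.getD' default is unreachable (nonempty)
    if reverse then (PySem.List.pyGet? indices (-1)).getD 0 else i0

-- ===== PRECONDITION & SPEC =====
-- Pre_ excludes exactly the inputs where Python A raises ZeroDivisionError:
-- modvalue = 0 with a nonempty sequence (on [] no '%' is evaluated and A returns -1).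
def Pre_find_index_py (sequence : List Int) (modvalue : Int) (reverse : Bool) : Prop :=
  modvalue ≠ 0 ∨ sequence = []
instance (sequence : List Int) (modvalue : Int) (reverse : Bool) : Decidable (Pre_find_index_py sequence modvalue reverse) := by unfold Pre_find_index_py; infer_instance
def pvWitness_find_index_py : List Int × Int × Bool := ([5, 6, 9], 3, true)

-- With reverse=True, when the last divisible element's value also occurs earlier in the list,
-- A returns the index of that earlier occurrence (sequence.index confuses value with position)
-- while B returns the actual position of the last divisible element, which is what a reverse
-- search is meant to find.
def D_find_index_py (sequence : List Int) (modvalue : Int) (reverse : Bool) : Prop :=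
  reverse = true ∧ ∃ j < sequence.length,
    PySem.Int.mod (sequence.getD j 0) modvalue = 0 ∧
    (sequence.getD j 0) ∈ sequence.take j ∧
    ∀ k < sequence.length, j < k → PySem.Int.mod (sequence.getD k 0) modvalue ≠ 0
instance (sequence : List Int) (modvalue : Int) (reverse : Bool) : Decidable (D_find_index_py sequence modvalue reverse) := by unfold D_find_index_py; infer_instance

def Spec_find_index_py (sequence : List Int) (modvalue : Int) (reverse : Bool) (out : Int) : Prop := ¬ D_find_index_py sequence modvalue reverse → out = find_index_py_alt sequence modvalue reverse
instance (sequence : List Int) (modvalue : Int) (reverse : Bool) (out : Int) : Decidable (Spec_find_index_py sequence modvalue reverse out) := by unfold Spec_find_index_py; infer_instance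

def pvDiffWitness_find_index_py : List Int × Int × Bool := ([2, 2], 1, true)
def pvDiffWitnessOut_find_index_py : Int × Int := (0, 1)

-- ===== CLAIM (what is proved, stated in full; the proofs are below) =====
def Claim_unchanged_find_index_py : Prop := ∀ (sequence : List Int) (modvalue : Int) (reverse : Bool), Dom_find_index_py sequence modvalue reverse → Pre_find_index_py sequence modvalue reverse → Spec_find_index_py sequence modvalue reverse (find_index_py sequence modvalue reverse)
def Claim_changed_find_index_py : Prop := Dom_find_index_py (pvDiffWitness_find_index_py.1) (pvDiffWitness_find_index_py.2.1) (pvDiffWitness_find_index_py.2.2) ∧ Pre_find_index_py (pvDiffWitness_find_index_py.1) (pvDiffWitness_find_index_py.2.1) (pvDiffWitness_find_index_py.2.2) ∧ D_find_index_py (pvDiffWitness_find_index_py.1) (pvDiffWitness_find_index_py.2.1) (pvDiffWitness_find_index_py.2.2) ∧ find_index_py (pvDiffWitness_find_index_py.1) (pvDiffWitness_find_index_py.2.1) (pvDiffWitness_find_index_py.2.2) = pvDiffWitnessOut_find_index_py.1 ∧ find_index_py_alt (pvDiffWitness_find_index_py.1) (pvDiffWitness_find_index_py.2.1) (pvDiffWitness_find_index_py.2.2)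 = pvDiffWitnessOut_find_index_py.2 ∧ pvDiffWitnessOut_find_index_py.1 ≠ pvDiffWitnessOut_find_index_py.2
def Claim_exact_find_index_py : Prop := ∀ (sequence : List Int) (modvalue : Int) (reverse : Bool), Dom_find_index_py sequence modvalue reverse → Pre_find_index_py sequence modvalue reverse → D_find_index_py sequence modvalue reverse → find_index_py sequence modvalue reverse ≠ find_index_py_alt sequence modvalue reverse

-- ===== LEMMAS AND PROOFS =====

theorem pvLoopA_eq (orig : List Int) (m : Int) (l : List Int) :
    pvLoopA orig m l =
      (l.find? (fun x => PySem.Int.mod x m == 0)).map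
        (fun x => (((PySem.List.index? orig x).getD 0 : Nat) : Int)) := by
  induction l with
  | nil => rfl
  | cons x rest ih =>
    by_cases h : (PySem.Int.mod x m == 0) = true
    · simp [pvLoopA, List.find?, h]
    · simp only [Bool.not_eq_true] at h
      simp [pvLoopA, List.find?, h, ih]

theorem pv_idx_nil (seq : List Int) (m : Int) (s : Int)
    (h : ∀ x ∈ seq, (PySem.Int.mod x m == 0) = false) :
    ((PySem.List.enumerate seq s).filter (fun p => PySem.Int.mod p.2 m == 0)).map
      (Prod.fst) = [] := by
  rw [List.map_eq_nil_iff, List.filter_eq_nil_iff]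
  intro p hp
  rw [PySem.List.mem_enumerate_iff] at hp
  obtain ⟨k, hk, rfl⟩ := hp
  simpa using h _ (by simp)

theorem pv_idx_head (seq : List Int) (m : Int) (x : Int)
    (h : seq.find? (fun x => PySem.Int.mod x m == 0) = some x) :
    ∀ s : Int, ∃ k : Nat, PySem.List.index? seq x = some k ∧
      (((PySem.List.enumerate seq s).filter (fun p => PySem.Int.mod p.2 m == 0)).map
        (Prod.fst)).head? = some (s + (k : Int)) := by
  induction seq with
  | nil => simp at h
  | cons y rest ih =>
    intro s
    by_cases hy : (PySem.Int.mod y m == 0) = true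
    · simp only [List.find?, hy] at h
      obtain rfl : y = x := by simpa using h
      refine ⟨0, PySem.List.index?_cons_self y rest, ?_⟩
      simp [PySem.List.enumerate_cons, hy]
    · simp only [Bool.not_eq_true] at hy
      simp only [List.find?, hy] at h
      have hne : y ≠ x := by
        intro hxy
        have := List.find?_some h
        rw [← hxy] at this; simp [hy] at this
      obtain ⟨k, hk1, hk2⟩ := ih h (s + 1)
      refine ⟨k + 1, ?_, ?_⟩
      · rw [PySem.List.index?_cons_of_ne (x := y) (xs := rest) (v := x) hne, hk1]; rfl
      · simp only [PySem.List.enumerate_cons, List.filter_cons]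
        rw [if_neg (by simp [hy])]
        rw [hk2]; congr 1; push_cast; ring

-- the reversed find? hits the LAST divisible position: seq[k] = x, the indices list ends at k,
-- and nothing after k is divisible
theorem pv_idx_last (seq : List Int) (m : Int) (x : Int)
    (h : seq.reverse.find? (fun x => PySem.Int.mod x m == 0) = some x) :
    ∀ s : Int, ∃ k : Nat, seq[k]? = some x ∧
      (((PySem.List.enumerate seq s).filter (fun p => PySem.Int.mod p.2 m == 0)).map
        (Prod.fst)).getLast? = some (s + (k : Int)) ∧
      ∀ i, i < seq.length → k < i → (PySem.Int.mod (seq.getD i 0) m == 0) = false := by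
  induction seq using List.reverseRecOn with
  | nil => simp at h
  | append_singleton ys y ih =>
    intro s
    simp only [List.reverse_append, List.reverse_singleton, List.singleton_append] at h
    by_cases hy : (PySem.Int.mod y m == 0) = true
    · simp only [List.find?, hy] at h
      obtain rfl : y = x := by simpa using h
      refine ⟨ys.length, by simp, ?_, ?_⟩
      · rw [PySem.List.enumerate_append, List.filter_append, List.map_append]
        simp [PySem.List.enumerate_cons, hy]
      · intro i hi hki
        simp only [List.length_append, List.length_singleton] at hi
        omega
    · simp only [Bool.not_eq_true] at hy
      simp only [List.find?, hy] at h
      obtain ⟨k, hk1, hk2, hk3⟩ := ih h s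
      have hklt : k < ys.length := by
        by_contra hc
        rw [List.getElem?_eq_none (by omega)] at hk1; exact (by simp at hk1)
      refine ⟨k, ?_, ?_, ?_⟩
      · rw [List.getElem?_append_left hklt]; exact hk1
      · rw [PySem.List.enumerate_append, List.filter_append, List.map_append]
        simp only [PySem.List.enumerate_cons, PySem.List.enumerate_nil, List.filter_cons]
        rw [if_neg (by simp [hy])]
        simpa using hk2
      · intro i hi hki
        simp only [List.length_append, List.length_singleton] at hi
        by_cases hiy : i < ys.length
        · rw [List.getD, List.getElem?_append_left hiy]
          have := hk3 i hiy hki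
          rwa [List.getD] at this
        · have : i = ys.length := by omega
          subst this
          simp [List.getD, hy]

-- find? on the reverse is none iff no element satisfies
theorem pv_find_rev_none (seq : List Int) (m : Int)
    (h : seq.reverse.find? (fun x => PySem.Int.mod x m == 0) = none) :
    ∀ x ∈ seq, (PySem.Int.mod x m == 0) = false := by
  rw [List.find?_eq_none] at h
  intro x hx
  simpa using h x (by simp [hx])

-- first-occurrence index: if seq[k] = x and x is not among the first k elements,
-- index? finds exactly k
theorem pv_index?_of_first (seq : List Int) (x : Int) (k : Nat)
    (hk : seq[k]? = some x) (hnt : x ∉ seq.take k) :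
    PySem.List.index? seq x = some k := by
  rw [PySem.List.index?_eq_idxOf?, List.idxOf?_eq_some_iff]
  have hlt : k < seq.length := (List.getElem?_eq_some_iff.mp hk).1
  refine ⟨hlt, (List.getElem?_eq_some_iff.mp hk).2, ?_⟩
  intro j hj hje
  exact hnt (List.mem_take_iff_getElem.mpr ⟨j, by omega, hje⟩)

-- ===== VERDICT =====
theorem find_index_py_spec : Claim_unchanged_find_index_py := by
  intro seq m rev _ _
  unfold Spec_find_index_py
  intro hnd
  unfold find_index_py find_index_py_alt
  cases rev with
  | false =>
    cases hf : seq.find? (fun x => PySem.Int.mod x m == 0) with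
    | none =>
      have hnil := pv_idx_nil seq m 0 (by
        intro x hx
        have := List.find?_eq_none.mp hf x hx
        simpa using this)
      simp [pvLoopA_eq, hf, hnil]
    | some x =>
      obtain ⟨k, hk1, hk2⟩ := pv_idx_head seq m x hf 0
      rw [zero_add] at hk2
      cases hi : ((PySem.List.enumerate seq 0).filter
          (fun p => PySem.Int.mod p.2 m == 0)).map (Prod.fst) with
      | nil => rw [hi] at hk2; simp at hk2
      | cons i0 rest =>
        rw [hi] at hk2
        simp only [List.head?_cons, Option.some.injEq] at hk2
        rw [PySem.List.index?_eq_idxOf?] at hk1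
        simp [pvLoopA_eq, hf, hk1, hk2]
  | true =>
    cases hf : seq.reverse.find? (fun x => PySem.Int.mod x m == 0) with
    | none =>
      have hall := pv_find_rev_none seq m hf
      have hnil := pv_idx_nil seq m 0 hall
      have hfn : seq.find? (fun x => PySem.Int.mod x m == 0) = none :=
        List.find?_eq_none.mpr (by intro x hx; simpa using hall x hx)
      simp [pvLoopA_eq, hf, hfn, hnil]
    | some x =>
      obtain ⟨k, hk1, hk2, hk3⟩ := pv_idx_last seq m x hf 0
      rw [zero_add] at hk2
      have hxdiv : PySem.Int.mod x m = 0 := by simpa using List.find?_some hf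
      have hklt : k < seq.length := (List.getElem?_eq_some_iff.mp hk1).1
      have hgd : seq.getD k 0 = x := by simp [List.getD, hk1]
      have hnt : x ∉ seq.take k := by
        intro hmem
        refine hnd ?_
        unfold D_find_index_py
        refine ⟨rfl, k, hklt, by rw [hgd]; exact hxdiv, by rw [hgd]; exact hmem, ?_⟩
        intro k' hk' hkk'
        have := hk3 k' hk' hkk'
        simpa using this
      have hidx := pv_index?_of_first seq x k hk1 hnt
      cases hi : ((PySem.List.enumerate seq 0).filter
          (fun p => PySem.Int.mod p.2 m == 0)).map (Prod.fst) with
      | nil => rw [hi] at hk2; simp at hk2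
      | cons i0 rest =>
        rw [hi] at hk2
        have hlast : PySem.List.pyGet? (i0 :: rest) (-1) = some ((k : Int)) := by
          rw [PySem.List.pyGet?_neg_one, hk2]
        rw [PySem.List.index?_eq_idxOf?] at hidx
        simp [pvLoopA_eq, hf, hidx, hlast]

theorem find_index_py_changed : Claim_changed_find_index_py := by
  unfold Claim_changed_find_index_py; decide

theorem find_index_py_tight : Claim_exact_find_index_py := by
  intro seq m rev _ _ hd
  obtain ⟨hrev, j, hj, hmod, hmem, htail⟩ := hd
  subst hrev
  unfold find_index_py find_index_py_alt
  -- the reversed find? succeeds: seq[j] is divisible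
  have hjx : seq.getD j 0 ∈ seq := by
    have : seq[j]'hj ∈ seq := List.getElem_mem hj
    simpa [List.getD, List.getElem?_eq_getElem hj] using this
  cases hf : seq.reverse.find? (fun x => PySem.Int.mod x m == 0) with
  | none =>
    have h := pv_find_rev_none seq m hf _ hjx
    rw [hmod] at h
    simp at h
  | some x =>
    obtain ⟨k, hk1, hk2, hk3⟩ := pv_idx_last seq m x hf 0
    rw [zero_add] at hk2
    have hxdiv : PySem.Int.mod x m = 0 := by simpa using List.find?_some hf
    have hklt : k < seq.length := (List.getElem?_eq_some_iff.mp hk1).1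
    -- j and k are both the last divisible position, hence equal
    have hjk : j = k := by
      by_contra hne
      rcases Nat.lt_or_ge j k with hlt | hge
      · have h := htail k hklt hlt
        rw [List.getD, hk1] at h
        exact h hxdiv
      · have hlt : k < j := by omega
        have h := hk3 j hj hlt
        rw [hmod] at h
        simp at h
    subst hjk
    have hxeq : x = seq.getD j 0 := by simp [List.getD, hk1]
    -- x occurs before position j, so index? finds an earlier occurrence
    have hmemx : x ∈ seq.take j := by rw [hxeq]; exact hmem
    obtain ⟨i0, hi0, hi0x⟩ := List.mem_take_iff_getElem.mp hmemx
    have hxseq : x ∈ seq := List.mem_of_mem_take hmemx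
    obtain ⟨i, hi⟩ := Option.isSome_iff_exists.mp (List.isSome_idxOf?.mpr hxseq)
    obtain ⟨hilt, hix, himin⟩ := List.idxOf?_eq_some_iff.mp hi
    have hij : i < j := by
      by_contra hc
      exact himin i0 (by omega) hi0x
    have hidx : PySem.List.index? seq x = some i := by
      rw [PySem.List.index?_eq_idxOf?]; exact hi
    cases hie : ((PySem.List.enumerate seq 0).filter
        (fun p => PySem.Int.mod p.2 m == 0)).map (Prod.fst) with
    | nil => rw [hie] at hk2; simp at hk2
    | cons q0 rest =>
      rw [hie] at hk2
      have hlast : PySem.List.pyGet? (q0 :: rest) (-1) = some ((j : Int)) := by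
        rw [PySem.List.pyGet?_neg_one, hk2]
      simp [pvLoopA_eq, hf, hi, hlast]
      omega
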